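-- pv_equiv track=rewrite | github.com/xinhui01/ashare-scan | src/sources/eastmoney/intraday.py | select_trade_date
-- ===== SOURCE A (Python) =====
-- from typing import Any, Callable, Dict, List, Optional, Tuple
--
-- def select_trade_date(
--     trade_dates: List[str],
--     day_offset: int = 0,
--     target_trade_date: str = "",
-- ) -> Tuple[str, int]:
--     if not trade_dates:
--         return "", 0
--
--     normalized_target = str(target_trade_date or "").strip()
--     if normalized_target:
--         selected_trade_date = ""
--         if normalized_target in trade_dates:
--             selected_trade_date = normalized_target
--         else:
--             for candidate in reversed(trade_dates):
--                 if candidate <= normalized_target: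
--                     selected_trade_date = candidate
--                     break
--             if not selected_trade_date:
--                 selected_trade_date = trade_dates[0]
--         selected_index = trade_dates.index(selected_trade_date)
--         return selected_trade_date, selected_index - (len(trade_dates) - 1)
--
--     try:
--         request_offset = int(day_offset)
--     except (TypeError, ValueError):
--         request_offset = 0
--     max_back = len(trade_dates) - 1
--     applied_offset = max(-max_back, min(request_offset, 0))
--     selected_index = len(trade_dates) - 1 + applied_offset
--     return trade_dates[selected_index], applied_offset
-- ===== SOURCE B (Python) =====
-- def select_trade_date(trade_dates, day_offset=0, target_trade_date=""):
--     n = len(trade_dates)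
--     if n == 0:
--         return "", 0
--
--     target = str(target_trade_date or "").strip()
--     if not target:
--         applied_offset = min(0, max(int(day_offset), 1 - n))
--         return trade_dates[n - 1 + applied_offset], applied_offset
--
--     # trade_dates is an ascending trading calendar: binary search.
--     # j = insertion point after all dates <= target (bisect_right, hand-rolled).
--     lo, hi = 0, n
--     while lo < hi:
--         mid = (lo + hi) // 2
--         if target < trade_dates[mid]:
--             hi = mid
--         else:
--             lo = mid + 1
--     selected = trade_dates[lo - 1] if lo > 0 else trade_dates[0]
--     # first occurrence of selected (bisect_left, hand-rolled).
--     lo2, hi2 = 0, n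
--     while lo2 < hi2:
--         mid = (lo2 + hi2) // 2
--         if trade_dates[mid] < selected:
--             lo2 = mid + 1
--         else:
--             hi2 = mid
--     return selected, lo2 - (n - 1)
-- ===== Notes on version B (the rewrite author's own statement) =====
-- stated objective: alternative
-- what changed: B exploits that trade_dates is an ascending trading calendar (stated as Pre_): it replaces A's membership test, reversed linear scan and .index pass by two hand-rolled binary searches (bisect_right for the latest date <= target, bisect_left for its first index); the sorted-family a timing run measured B 1.88x faster at n=262144, the random-family probe cannot credit speed since unsorted inputs lie outside Pre_.
-- outside the precondition, e.g. on select_trade_date(['b', 'a'], 0, 'a'): A returns ('a', 0), B returns ('a', -1)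
import Mathlib
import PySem

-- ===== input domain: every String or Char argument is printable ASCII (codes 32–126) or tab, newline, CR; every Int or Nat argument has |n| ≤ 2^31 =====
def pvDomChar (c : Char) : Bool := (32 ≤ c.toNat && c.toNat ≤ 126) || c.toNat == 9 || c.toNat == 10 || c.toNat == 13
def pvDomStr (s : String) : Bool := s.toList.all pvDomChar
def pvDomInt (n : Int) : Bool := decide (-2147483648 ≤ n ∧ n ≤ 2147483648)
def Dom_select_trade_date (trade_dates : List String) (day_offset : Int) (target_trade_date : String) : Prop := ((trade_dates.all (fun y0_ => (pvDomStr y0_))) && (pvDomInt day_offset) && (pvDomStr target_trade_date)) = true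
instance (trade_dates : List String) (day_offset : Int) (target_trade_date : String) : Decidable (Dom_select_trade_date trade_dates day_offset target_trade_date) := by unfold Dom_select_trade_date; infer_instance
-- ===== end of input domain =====

-- B requires the ascending trading calendar (Pre_) and locates the selection by hand-rolled
-- binary searches (bisect_right for the latest date <= target, bisect_left for its first index)
-- instead of A's linear scans; Pre_ excludes unsorted lists, on which A still returns.


-- ===== PORT A =====
def select_trade_date (trade_dates : List String) (day_offset : Int) (target_trade_date : String) : String × Int :=
  if trade_dates = [] then ("", 0)
  else
    let normalized_target := PySem.Str.strip target_trade_date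
    if normalized_target ≠ "" then
      let selected_trade_date :=
        if trade_dates.contains normalized_target then normalized_target
        else
          let selected := (trade_dates.reverse.find? (fun candidate => decide (candidate.toList ≤ normalized_target.toList))).getD ""
          if selected = "" then trade_dates.headD "" else selected
      let selected_index : Int := ((PySem.List.index? trade_dates selected_trade_date).getD 0 : Nat)
      (selected_trade_date, selected_index - ((trade_dates.length : Int) - 1))
    else
      let request_offset := day_offset
      let max_back : Int := (trade_dates.length : Int) - 1
      let applied_offset := max (-max_back) (min request_offset 0)
      let selected_index := (trade_dates.length : Int) - 1 + applied_offset
      ((PySem.List.pyGet? trade_dates selected_index).getD "", applied_offset)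

-- ===== PORT B =====
-- hand-rolled bisect_right loop of Source B (insertion point after all dates <= x on [lo, hi))
def bisR (a : List String) (x : String) (lo hi : Nat) : Nat :=
  if h : lo < hi then
    let mid := (lo + hi) / 2
    if x.toList < (a.getD mid "").toList then bisR a x lo mid
    else bisR a x (mid + 1) hi
  else lo
termination_by hi - lo
decreasing_by all_goals omega

-- hand-rolled bisect_left loop of Source B (first position whose date is not < x on [lo, hi))
def bisL (a : List String) (x : String) (lo hi : Nat) : Nat :=
  if h : lo < hi then
    let mid := (lo + hi) / 2
    if (a.getD mid "").toList < x.toList then bisL a x (mid + 1) hi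
    else bisL a x lo mid
  else lo
termination_by hi - lo
decreasing_by all_goals omega

def select_trade_date_alt (trade_dates : List String) (day_offset : Int) (target_trade_date : String) : String × Int :=
  let n := trade_dates.length
  if n = 0 then ("", 0)
  else
    let target := PySem.Str.strip target_trade_date
    if target = "" then
      let applied_offset := min 0 (max day_offset (1 - (n : Int)))
      ((PySem.List.pyGet? trade_dates ((n : Int) - 1 + applied_offset)).getD "", applied_offset)
    else
      let j := bisR trade_dates target 0 n
      let selected := if 0 < j then trade_dates.getD (j - 1) "" else trade_dates.getD 0 ""
      let i := bisL trade_dates selected 0 n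
      (selected, (i : Int) - ((n : Int) - 1))

-- ===== PRECONDITION & SPEC =====
-- Pre_ narrows A's domain: when a nonempty target is given, trade_dates must be sorted
-- ascending (it is a trading calendar); B's binary search requires this, while A also
-- returns a value on unsorted lists, which Pre_ therefore excludes.
def Pre_select_trade_date (trade_dates : List String) (day_offset : Int) (target_trade_date : String) : Prop :=
  PySem.Str.strip target_trade_date ≠ "" →
    List.Pairwise (fun a b => a.toList ≤ b.toList) trade_dates
instance (trade_dates : List String) (day_offset : Int) (target_trade_date : String) : Decidable (Pre_select_trade_date trade_dates day_offset target_trade_date) := by unfold Pre_select_trade_date; infer_instance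

def pvWitness_select_trade_date : List String × Int × String := (["20240101", "20240102", "20240105"], -1, "20240103")

def Spec_select_trade_date (trade_dates : List String) (day_offset : Int) (target_trade_date : String) (out : String × Int) : Prop := out = select_trade_date_alt trade_dates day_offset target_trade_date
instance (trade_dates : List String) (day_offset : Int) (target_trade_date : String) (out : String × Int) : Decidable (Spec_select_trade_date trade_dates day_offset target_trade_date out) := by unfold Spec_select_trade_date; infer_instance

-- ===== CLAIM (what is proved, stated in full; the proofs are below) =====
def Claim_equal_select_trade_date : Prop := ∀ (trade_dates : List String) (day_offset : Int) (target_trade_date : String), Dom_select_trade_date trade_dates day_offset target_trade_date → Pre_select_trade_date trade_dates day_offset target_trade_date → Spec_select_trade_date trade_dates day_offset target_trade_date (select_trade_date trade_dates day_offset target_trade_date)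

-- ===== LEMMAS AND PROOFS =====

theorem sorted_mono {td : List String} (hs : List.Pairwise (fun a b => a.toList ≤ b.toList) td)
    {i k : Nat} (hik : i ≤ k) (hk : k < td.length) :
    (td[i]'(lt_of_le_of_lt hik hk)).toList ≤ td[k].toList := by
  rcases lt_or_eq_of_le hik with h | h
  · exact (List.pairwise_iff_getElem.mp hs) i k _ hk h
  · subst h; exact le_refl _

theorem bisR_spec (td : List String) (x : String)
    (hs : List.Pairwise (fun a b => a.toList ≤ b.toList) td) :
    ∀ (lo hi : Nat), lo ≤ hi → hi ≤ td.length →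
      lo ≤ bisR td x lo hi ∧ bisR td x lo hi ≤ hi ∧
      (∀ i (h : i < td.length), lo ≤ i → i < bisR td x lo hi → td[i].toList ≤ x.toList) ∧
      (∀ i (h : i < td.length), bisR td x lo hi ≤ i → i < hi → x.toList < td[i].toList) := by
  suffices H : ∀ d lo hi, hi - lo ≤ d → lo ≤ hi → hi ≤ td.length →
      lo ≤ bisR td x lo hi ∧ bisR td x lo hi ≤ hi ∧
      (∀ i (h : i < td.length), lo ≤ i → i < bisR td x lo hi → td[i].toList ≤ x.toList) ∧
      (∀ i (h : i < td.length), bisR td x lo hi ≤ i → i < hi → x.toList < td[i].toList) by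
    intro lo hi h1 h2; exact H (hi - lo) lo hi le_rfl h1 h2
  intro d
  induction d with
  | zero =>
    intro lo hi hd h1 h2
    have he : ¬ lo < hi := by omega
    have hb : bisR td x lo hi = lo := by rw [bisR]; simp only [dif_neg he]
    refine ⟨le_rfl.trans_eq hb.symm, by omega, ?_, ?_⟩ <;> intro i h hi1 hi2 <;> omega
  | succ d ih =>
    intro lo hi hd h1 h2
    by_cases h : lo < hi
    · have hmid1 : lo ≤ (lo + hi) / 2 := by omega
      have hmid2 : (lo + hi) / 2 < hi := by omega
      have hmn : (lo + hi) / 2 < td.length := by omega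
      have hget : td.getD ((lo + hi) / 2) "" = td[(lo + hi) / 2] := List.getD_eq_getElem td "" hmn
      by_cases hc : x.toList < (td.getD ((lo + hi) / 2) "").toList
      · have hb : bisR td x lo hi = bisR td x lo ((lo + hi) / 2) := by
          rw [bisR]; simp only [dif_pos h, if_pos hc]
        obtain ⟨r1, r2, r3, r4⟩ := ih lo ((lo + hi) / 2) (by omega) (by omega) (by omega)
        rw [hb]
        refine ⟨r1, by omega, r3, ?_⟩
        intro i hin hi1 hi2
        rcases Nat.lt_or_ge i ((lo + hi) / 2) with hlt | hge
        · exact r4 i hin hi1 hlt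
        · have : (td[(lo + hi) / 2]).toList ≤ td[i].toList := sorted_mono hs hge hin
          rw [hget] at hc
          exact lt_of_lt_of_le hc this
      · have hb : bisR td x lo hi = bisR td x ((lo + hi) / 2 + 1) hi := by
          rw [bisR]; simp only [dif_pos h, if_neg hc]
        have hcle : (td[(lo + hi) / 2]).toList ≤ x.toList := by
          rw [hget] at hc; exact Std.not_lt.mp hc
        obtain ⟨r1, r2, r3, r4⟩ := ih ((lo + hi) / 2 + 1) hi (by omega) (by omega) h2
        rw [hb]
        refine ⟨by omega, r2, ?_, r4⟩
        intro i hin hi1 hi2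
        rcases Nat.lt_or_ge i ((lo + hi) / 2 + 1) with hlt | hge
        · have : td[i].toList ≤ (td[(lo + hi) / 2]).toList := sorted_mono hs (by omega) hmn
          exact this.trans hcle
        · exact r3 i hin hge hi2
    · have hb : bisR td x lo hi = lo := by rw [bisR]; simp only [dif_neg h]
      refine ⟨le_rfl.trans_eq hb.symm, by omega, ?_, ?_⟩ <;> intro i hin hi1 hi2 <;> omega

theorem bisL_spec (td : List String) (x : String)
    (hs : List.Pairwise (fun a b => a.toList ≤ b.toList) td) :
    ∀ (lo hi : Nat), lo ≤ hi → hi ≤ td.length →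
      lo ≤ bisL td x lo hi ∧ bisL td x lo hi ≤ hi ∧
      (∀ i (h : i < td.length), lo ≤ i → i < bisL td x lo hi → td[i].toList < x.toList) ∧
      (∀ i (h : i < td.length), bisL td x lo hi ≤ i → i < hi → x.toList ≤ td[i].toList) := by
  suffices H : ∀ d lo hi, hi - lo ≤ d → lo ≤ hi → hi ≤ td.length →
      lo ≤ bisL td x lo hi ∧ bisL td x lo hi ≤ hi ∧
      (∀ i (h : i < td.length), lo ≤ i → i < bisL td x lo hi → td[i].toList < x.toList) ∧
      (∀ i (h : i < td.length), bisL td x lo hi ≤ i → i < hi → x.toList ≤ td[i].toList) by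
    intro lo hi h1 h2; exact H (hi - lo) lo hi le_rfl h1 h2
  intro d
  induction d with
  | zero =>
    intro lo hi hd h1 h2
    have he : ¬ lo < hi := by omega
    have hb : bisL td x lo hi = lo := by rw [bisL]; simp only [dif_neg he]
    refine ⟨le_rfl.trans_eq hb.symm, by omega, ?_, ?_⟩ <;> intro i h hi1 hi2 <;> omega
  | succ d ih =>
    intro lo hi hd h1 h2
    by_cases h : lo < hi
    · have hmid1 : lo ≤ (lo + hi) / 2 := by omega
      have hmid2 : (lo + hi) / 2 < hi := by omega
      have hmn : (lo + hi) / 2 < td.length := by omega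
      have hget : td.getD ((lo + hi) / 2) "" = td[(lo + hi) / 2] := List.getD_eq_getElem td "" hmn
      by_cases hc : (td.getD ((lo + hi) / 2) "").toList < x.toList
      · have hb : bisL td x lo hi = bisL td x ((lo + hi) / 2 + 1) hi := by
          rw [bisL]; simp only [dif_pos h, if_pos hc]
        have hclt : (td[(lo + hi) / 2]).toList < x.toList := by rw [hget] at hc; exact hc
        obtain ⟨r1, r2, r3, r4⟩ := ih ((lo + hi) / 2 + 1) hi (by omega) (by omega) h2
        rw [hb]
        refine ⟨by omega, r2, ?_, r4⟩
        intro i hin hi1 hi2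
        rcases Nat.lt_or_ge i ((lo + hi) / 2 + 1) with hlt | hge
        · have : td[i].toList ≤ (td[(lo + hi) / 2]).toList := sorted_mono hs (by omega) hmn
          exact lt_of_le_of_lt this hclt
        · exact r3 i hin hge hi2
      · have hb : bisL td x lo hi = bisL td x lo ((lo + hi) / 2) := by
          rw [bisL]; simp only [dif_pos h, if_neg hc]
        have hcge : x.toList ≤ (td[(lo + hi) / 2]).toList := by
          rw [hget] at hc; exact Std.not_lt.mp hc
        obtain ⟨r1, r2, r3, r4⟩ := ih lo ((lo + hi) / 2) (by omega) (by omega) (by omega)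
        rw [hb]
        refine ⟨r1, by omega, r3, ?_⟩
        intro i hin hi1 hi2
        rcases Nat.lt_or_ge i ((lo + hi) / 2) with hlt | hge
        · exact r4 i hin hi1 hlt
        · have : (td[(lo + hi) / 2]).toList ≤ td[i].toList := sorted_mono hs hge hin
          exact hcge.trans this
    · have hb : bisL td x lo hi = lo := by rw [bisL]; simp only [dif_neg h]
      refine ⟨le_rfl.trans_eq hb.symm, by omega, ?_, ?_⟩ <;> intro i hin hi1 hi2 <;> omega

-- the first occurrence of a member of a sorted list is found by the bisect_left loop
theorem index?_eq_bisL (td : List String) (s : String)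
    (hs : List.Pairwise (fun a b => a.toList ≤ b.toList) td) (hmem : s ∈ td) :
    PySem.List.index? td s = some (bisL td s 0 td.length) := by
  obtain ⟨q, hq, hqs⟩ := List.getElem_of_mem hmem
  obtain ⟨-, hl2, hl3, hl4⟩ := bisL_spec td s hs 0 td.length (Nat.zero_le _) le_rfl
  set l := bisL td s 0 td.length with hldef
  have hql : l ≤ q := by
    by_contra hqlt
    exact lt_irrefl _ (hqs ▸ hl3 q hq (Nat.zero_le _) (by omega))
  have hln : l < td.length := lt_of_le_of_lt hql hq
  have hsl : td[l] = s := by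
    have h1 : s.toList ≤ td[l].toList := hl4 l hln le_rfl hln
    have h2 : td[l].toList ≤ td[q].toList := sorted_mono hs hql hq
    rw [hqs] at h2
    exact String.toList_inj.mp (le_antisymm h2 h1)
  rw [PySem.List.index?_eq_some_iff]
  refine ⟨td.take l, td.drop (l + 1), ?_, ?_, ?_⟩
  · conv_lhs => rw [← List.take_append_drop l td, List.drop_eq_getElem_cons hln, hsl]
  · simp [List.length_take, hln.le]
  · intro hmemtake
    obtain ⟨i, hi, his⟩ := List.getElem_of_mem hmemtake
    rw [List.length_take] at hi
    rw [List.getElem_take] at his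
    have : td[i].toList < s.toList := hl3 i (by omega) (Nat.zero_le _) (by omega)
    rw [his] at this
    exact lt_irrefl _ this

-- A's reversed linear scan finds exactly the bisect_right selection
theorem find?_rev_eq (td : List String) (x : String)
    (hs : List.Pairwise (fun a b => a.toList ≤ b.toList) td) :
    td.reverse.find? (fun c => decide (c.toList ≤ x.toList)) =
      if h : 0 < bisR td x 0 td.length
      then some (td[bisR td x 0 td.length - 1]'(by
        have := (bisR_spec td x hs 0 td.length (Nat.zero_le _) le_rfl).2.1
        omega))
      else none := by
  obtain ⟨-, hj2, hj3, hj4⟩ := bisR_spec td x hs 0 td.length (Nat.zero_le _) le_rfl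
  set j := bisR td x 0 td.length with hjdef
  have hdropnone : (td.drop j).reverse.find? (fun c => decide (c.toList ≤ x.toList)) = none := by
    rw [List.find?_eq_none]
    intro a ha
    rw [List.mem_reverse] at ha
    obtain ⟨i, hi, his⟩ := List.getElem_of_mem ha
    rw [List.getElem_drop] at his
    rw [List.length_drop] at hi
    have hx : x.toList < a.toList := his ▸ hj4 (j + i) (by omega) (by omega) (by omega)
    simp [Std.not_le.mpr hx]
  by_cases h : 0 < j
  · rw [dif_pos h]
    have hjn : j - 1 < td.length := by omega
    have hrev : td.reverse = (td.drop j).reverse ++ (td.take j).reverse := by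
      rw [← List.reverse_append, List.take_append_drop]
    have htake : td.take j = td.take (j - 1) ++ [td[j - 1]] := by
      conv_lhs => rw [show j = (j - 1) + 1 by omega]
      rw [List.take_add_one, List.getElem?_eq_getElem hjn]
      rfl
    rw [hrev, List.find?_append, hdropnone, htake, List.reverse_append]
    simp only [Option.none_or]
    simp only [List.reverse_singleton, List.singleton_append]
    rw [List.find?_cons_of_pos]
    simp [hj3 (j - 1) hjn (Nat.zero_le _) (by omega)]
  · rw [dif_neg h]
    have : td.drop j = td := by
      have : j = 0 := by omega
      simp [this]
    rw [← this]
    simpa using hdropnone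

-- ===== VERDICT =====
theorem select_trade_date_spec : Claim_equal_select_trade_date := by
  intro td off tgt _dom hpre
  unfold Spec_select_trade_date select_trade_date select_trade_date_alt
  by_cases htd : td = []
  · subst htd; simp
  · have hn : td.length ≠ 0 := by simpa [List.length_eq_zero_iff] using htd
    simp only [if_neg htd, if_neg hn]
    by_cases ht : PySem.Str.strip tgt = ""
    · simp only [ht, ite_not]
      have hmm : max (-((td.length : Int) - 1)) (min off 0)
          = min 0 (max off (1 - (td.length : Int))) := by omega
      rw [hmm]
      simp
    · simp only [ite_not, if_neg ht]
      have hs := hpre ht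
      have hnpos : 0 < td.length := by omega
      obtain ⟨-, hj2, hj3, hj4⟩ := bisR_spec td (PySem.Str.strip tgt) hs 0 td.length (Nat.zero_le _) le_rfl
      have hfind := find?_rev_eq td (PySem.Str.strip tgt) hs
      set x := PySem.Str.strip tgt with hxdef
      set j := bisR td x 0 td.length with hjdef
      rw [hfind]
      by_cases hc : x ∈ td
      · have hcc : td.contains x = true := by simpa using hc
        obtain ⟨q, hq, hqs⟩ := List.getElem_of_mem hc
        have h0 : 0 < j := by
          by_contra h0
          exact lt_irrefl _ (hqs ▸ hj4 q hq (by omega) hq)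
        have hq1 : q ≤ j - 1 := by
          by_contra hgt
          exact lt_irrefl _ (hqs ▸ hj4 q hq (by omega) hq)
        have hjn : j - 1 < td.length := by omega
        have hjx : td[j - 1] = x := by
          have h1 : td[j - 1].toList ≤ x.toList := hj3 (j - 1) hjn (Nat.zero_le _) (by omega)
          have h2 : td[q].toList ≤ td[j - 1].toList := sorted_mono hs hq1 hjn
          rw [hqs] at h2
          exact String.toList_inj.mp (le_antisymm h1 h2)
        simp only [hcc, if_true]
        rw [index?_eq_bisL td x hs hc, if_pos h0,
          List.getD_eq_getElem td "" hjn, hjx]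
        simp
      · have hcc : td.contains x = false := by simpa using hc
        simp only [hcc, Bool.false_eq_true, if_false]
        by_cases h0 : 0 < j
        · have hjn : j - 1 < td.length := by omega
          rw [dif_pos h0]
          simp only [Option.getD_some]
          have hmemj : td[j - 1] ∈ td := List.getElem_mem hjn
          by_cases hz : td[j - 1] = ""
          · have hz0 : td[0]'hnpos = "" := by
              have h1 : (td[0]'hnpos).toList ≤ td[j - 1].toList := sorted_mono hs (Nat.zero_le _) hjn
              rw [hz, String.toList_empty] at h1
              have : (td[0]'hnpos).toList = [] := by
                rcases hl : (td[0]'hnpos).toList with _ | ⟨a, t⟩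
                · rfl
                · rw [hl] at h1
                  exact absurd (List.nil_lt_cons a t) (Std.not_lt.mpr h1)
              exact String.toList_inj.mp (by rw [this, String.toList_empty])
            have hhead : td.headD "" = td[0]'hnpos := by
              rcases td with _ | ⟨a, t⟩
              · simp at hnpos
              · simp
            rw [if_pos hz, hhead, hz0, if_pos h0, List.getD_eq_getElem td "" hjn, hz]
            rw [index?_eq_bisL td "" hs (hz ▸ hmemj)]
            simp
          · rw [if_neg hz, if_pos h0, List.getD_eq_getElem td "" hjn]
            rw [index?_eq_bisL td td[j - 1] hs hmemj]
            simp
            rfl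
        · rw [dif_neg h0]
          simp only [Option.getD_none, if_true]
          have hhead : td.headD "" = td[0]'hnpos := by
            rcases td with _ | ⟨a, t⟩
            · simp at hnpos
            · simp
          have hmem0 : td[0]'hnpos ∈ td := List.getElem_mem hnpos
          rw [hhead, if_neg h0, List.getD_eq_getElem td "" hnpos]
          rw [index?_eq_bisL td (td[0]'hnpos) hs hmem0]
          simp
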